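-- pv_equiv track=rewrite | github.com/shaonianruntu/Digital-Image-Processing-Assignment | 作业四/work2/model.py | rowmore_middle_encode
-- ===== SOURCE A (Python) =====
-- def rowmore_middle_encode(matirx, mlen, mcols, mrows):
--     rmatrix = []
--     if mlen % 2 == 0:
--         for extra in range(mrows - mcols):
--             if extra % 2 == 1:
--                 for i in range(mlen + 1):
--                     rmatrix.append(matirx[mlen - i + extra + 1][i])
--             else:
--                 for i in range(mlen + 1):
--                     rmatrix.append(matirx[i + extra + 1][mlen - i])
--     else:
--         for extra in range(mrows - mcols):
--             if extra % 2 == 0: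
--                 for i in range(mlen + 1):
--                     rmatrix.append(matirx[mlen - i + extra + 1][i])
--             else:
--                 for i in range(mlen + 1):
--                     rmatrix.append(matirx[i + extra + 1][mlen - i])
--
--     return rmatrix
-- ===== SOURCE B (Python) =====
-- def rowmore_middle_encode(matirx, mlen, mcols, mrows):
--     # Order-by-key formulation: every visited cell lies on an anti-diagonal
--     # x + y = s with s in [mlen+1, mlen + (mrows-mcols)] and 0 <= y <= mlen;
--     # the traversal visits diagonals in increasing s, walking y upward when s
--     # is even and downward when s is odd.  So enumerate the cells column-major
--     # and let a sort by that key produce the zigzag order.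
--     if mrows <= mcols:
--         return []
--     cells = [(x, y)
--              for y in range(mlen + 1)
--              for x in range(mlen + 1 - y, mlen + 1 - y + mrows - mcols)]
--     cells.sort(key=lambda c: (c[0] + c[1],
--                               c[1] if (c[0] + c[1]) % 2 == 0 else -c[1]))
--     return [matirx[x][y] for x, y in cells]
-- ===== Notes on version B (the rewrite author's own statement) =====
-- stated objective: alternative
-- what changed: Instead of A's four direction-specific zigzag append loops under two parity branches, B enumerates the visited cells column-major with a comprehension and obtains the zigzag order by sorting the cells on the key (anti-diagonal sum, +/-column chosen by the sum's parity), then reads the matrix along the sorted cells.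
import Mathlib
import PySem

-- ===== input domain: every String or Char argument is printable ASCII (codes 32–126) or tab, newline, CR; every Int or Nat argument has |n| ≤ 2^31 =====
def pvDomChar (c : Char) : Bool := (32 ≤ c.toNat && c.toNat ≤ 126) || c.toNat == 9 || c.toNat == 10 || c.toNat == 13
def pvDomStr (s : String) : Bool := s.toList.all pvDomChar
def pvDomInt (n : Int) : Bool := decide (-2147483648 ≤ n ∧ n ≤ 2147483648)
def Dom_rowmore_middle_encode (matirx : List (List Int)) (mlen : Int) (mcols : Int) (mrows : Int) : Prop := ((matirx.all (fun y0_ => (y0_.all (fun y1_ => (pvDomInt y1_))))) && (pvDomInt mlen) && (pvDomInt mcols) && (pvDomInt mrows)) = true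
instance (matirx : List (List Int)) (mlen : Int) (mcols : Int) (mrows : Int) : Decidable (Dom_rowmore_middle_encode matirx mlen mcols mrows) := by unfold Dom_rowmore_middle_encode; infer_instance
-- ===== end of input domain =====

-- B replaces A's four direction-specific zigzag loops by enumerating the visited cells column-major and sorting them by a diagonal/parity key (objective: alternative).


-- ===== PORT A =====
-- Port of A: outer branch on mlen parity, each arm a loop over extra with two direction-specific inner append loops.
def rowmore_middle_encode (matirx : List (List Int)) (mlen : Int) (mcols : Int) (mrows : Int) : List Int :=
  let rmatrix : List Int := []
  if PySem.Int.mod mlen 2 = 0 then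
    (PySem.List.pyRange 0 (mrows - mcols) 1).foldl (fun acc extra =>
      if PySem.Int.mod extra 2 = 1 then
        (PySem.List.pyRange 0 (mlen + 1) 1).foldl
          (fun acc2 i => acc2 ++ [PySem.List.pyGetD (PySem.List.pyGetD matirx (mlen - i + extra + 1) []) i 0]) acc
      else
        (PySem.List.pyRange 0 (mlen + 1) 1).foldl
          (fun acc2 i => acc2 ++ [PySem.List.pyGetD (PySem.List.pyGetD matirx (i + extra + 1) []) (mlen - i) 0]) acc) rmatrix
  else
    (PySem.List.pyRange 0 (mrows - mcols) 1).foldl (fun acc extra =>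
      if PySem.Int.mod extra 2 = 0 then
        (PySem.List.pyRange 0 (mlen + 1) 1).foldl
          (fun acc2 i => acc2 ++ [PySem.List.pyGetD (PySem.List.pyGetD matirx (mlen - i + extra + 1) []) i 0]) acc
      else
        (PySem.List.pyRange 0 (mlen + 1) 1).foldl
          (fun acc2 i => acc2 ++ [PySem.List.pyGetD (PySem.List.pyGetD matirx (i + extra + 1) []) (mlen - i) 0]) acc) rmatrix

-- ===== PORT B =====
-- B (alternative): enumerate the visited cells column-major, sort them by the
-- key (anti-diagonal sum, ±column with the sign fixed by the sum's parity), read the matrix along the sorted cells.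
def rowmore_middle_encode_alt (matirx : List (List Int)) (mlen : Int) (mcols : Int) (mrows : Int) : List Int :=
  if mrows ≤ mcols then [] else
  let cells : List (Int × Int) :=
    (PySem.List.pyRange 0 (mlen + 1) 1).flatMap (fun y =>
      (PySem.List.pyRange (mlen + 1 - y) (mlen + 1 - y + (mrows - mcols)) 1).map (fun x => (x, y)))
  let sortedCells := PySem.List.sorted2 cells (fun c => c.1 + c.2)
      (fun c => if PySem.Int.mod (c.1 + c.2) 2 = 0 then c.2 else -c.2)
  sortedCells.map (fun c => PySem.List.pyGetD (PySem.List.pyGetD matirx c.1 []) c.2 0)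

-- ===== PRECONDITION & SPEC =====
-- Pre_: exactly the inputs where Python A returns (no IndexError): when any diagonal is traversed at all,
-- the deepest touched row mlen+(mrows-mcols) exists and each touched row is long enough for its deepest touched column.
def Pre_rowmore_middle_encode (matirx : List (List Int)) (mlen : Int) (mcols : Int) (mrows : Int) : Prop :=
  mlen < 0 ∨ mrows - mcols ≤ 0 ∨
  (mlen + (mrows - mcols) < (matirx.length : Int) ∧
   ∀ p ∈ matirx.zipIdx, 1 ≤ p.2 → (p.2 : Int) ≤ mlen + (mrows - mcols) →
     mlen - (p.2 : Int) + min (mrows - mcols) (p.2 : Int) < (p.1.length : Int))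
instance (matirx : List (List Int)) (mlen : Int) (mcols : Int) (mrows : Int) : Decidable (Pre_rowmore_middle_encode matirx mlen mcols mrows) := by unfold Pre_rowmore_middle_encode; infer_instance
def pvWitness_rowmore_middle_encode : List (List Int) × Int × Int × Int := ([[0, 0], [1, 2], [3, 4]], 1, 1, 2)
def Spec_rowmore_middle_encode (matirx : List (List Int)) (mlen : Int) (mcols : Int) (mrows : Int) (out : List Int) : Prop := out = rowmore_middle_encode_alt matirx mlen mcols mrows
instance (matirx : List (List Int)) (mlen : Int) (mcols : Int) (mrows : Int) (out : List Int) : Decidable (Spec_rowmore_middle_encode matirx mlen mcols mrows out) := by unfold Spec_rowmore_middle_encode; infer_instance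

-- ===== CLAIM (what is proved, stated in full; the proofs are below) =====
def Claim_equal_rowmore_middle_encode : Prop := ∀ (matirx : List (List Int)) (mlen : Int) (mcols : Int) (mrows : Int), Dom_rowmore_middle_encode matirx mlen mcols mrows → Pre_rowmore_middle_encode matirx mlen mcols mrows → Spec_rowmore_middle_encode matirx mlen mcols mrows (rowmore_middle_encode matirx mlen mcols mrows)

-- ===== LEMMAS AND PROOFS =====

-- proof-local names: the cell list B enumerates, the zigzag order A produces, the single-Int sort key
def pvCells (mlen d : Int) : List (Int × Int) :=
  (PySem.List.pyRange 0 (mlen + 1) 1).flatMap (fun y =>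
    (PySem.List.pyRange (mlen + 1 - y) (mlen + 1 - y + d) 1).map (fun x => (x, y)))

def pvDiag (mlen extra : Int) : List (Int × Int) :=
  if (mlen + extra) % 2 = 1 then
    (PySem.List.pyRange 0 (mlen + 1) 1).map (fun i => (mlen - i + extra + 1, i))
  else
    (PySem.List.pyRange 0 (mlen + 1) 1).map (fun i => (i + extra + 1, mlen - i))

def pvTgt (mlen d : Int) : List (Int × Int) := (PySem.List.pyRange 0 d 1).flatMap (pvDiag mlen)

def pvKey (mlen : Int) (c : Int × Int) : Int :=
  (c.1 + c.2) * (2 * mlen + 3) + (if (c.1 + c.2) % 2 = 0 then c.2 else -c.2)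

theorem pvKey_lt_of_sum_lt (mlen : Int) (a b : Int × Int)
    (ha : 0 ≤ a.2 ∧ a.2 ≤ mlen) (hb : 0 ≤ b.2 ∧ b.2 ≤ mlen)
    (hs : a.1 + a.2 < b.1 + b.2) : pvKey mlen a < pvKey mlen b := by
  have hM : (0:Int) ≤ 2 * mlen + 3 := by omega
  have hmul : (a.1 + a.2 + 1) * (2 * mlen + 3) ≤ (b.1 + b.2) * (2 * mlen + 3) :=
    mul_le_mul_of_nonneg_right (by omega) hM
  unfold pvKey
  have h2a : -mlen ≤ (if (a.1 + a.2) % 2 = 0 then a.2 else -a.2) ∧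
      (if (a.1 + a.2) % 2 = 0 then a.2 else -a.2) ≤ mlen := by split_ifs <;> omega
  have h2b : -mlen ≤ (if (b.1 + b.2) % 2 = 0 then b.2 else -b.2) ∧
      (if (b.1 + b.2) % 2 = 0 then b.2 else -b.2) ≤ mlen := by split_ifs <;> omega
  nlinarith [h2a.1, h2a.2, h2b.1, h2b.2, hmul]

theorem pvKey_lt_iff (mlen : Int) (a b : Int × Int)
    (ha : 0 ≤ a.2 ∧ a.2 ≤ mlen) (hb : 0 ≤ b.2 ∧ b.2 ≤ mlen) :
    pvKey mlen a < pvKey mlen b ↔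
      (a.1 + a.2 < b.1 + b.2 ∨ (a.1 + a.2 = b.1 + b.2 ∧
        (if (a.1 + a.2) % 2 = 0 then a.2 else -a.2) < (if (b.1 + b.2) % 2 = 0 then b.2 else -b.2))) := by
  rcases lt_trichotomy (a.1 + a.2) (b.1 + b.2) with h | h | h
  · simp only [h, true_or, iff_true]
    exact pvKey_lt_of_sum_lt mlen a b ha hb h
  · constructor
    · intro hk
      refine Or.inr ⟨h, ?_⟩
      unfold pvKey at hk
      rw [h] at hk
      omega
    · intro hc
      rcases hc with hlt | ⟨_, h2⟩
      · omega
      · unfold pvKey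
        rw [h]
        omega
  · have hgt := pvKey_lt_of_sum_lt mlen b a hb ha h
    constructor
    · intro hk; omega
    · intro hc; omega

-- congruence for insertion under two comparison functions agreeing on the touched elements
theorem pvInsertBy_congr {α : Type} (lt lt' : α → α → Bool) (x : α) :
    ∀ (ys : List α), (∀ y ∈ ys, lt x y = lt' x y) →
      PySem.List.insertBy lt x ys = PySem.List.insertBy lt' x ys := by
  intro ys
  induction ys with
  | nil => intro _; rfl
  | cons y ys ih =>
    intro h
    simp only [PySem.List.insertBy]
    rw [h y (List.mem_cons_self)]
    by_cases hxy : lt' x y = true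
    · rw [if_pos hxy, if_pos hxy]
    · rw [if_neg hxy, if_neg hxy, ih (fun z hz => h z (List.mem_cons_of_mem y hz))]

theorem pvFoldl_insertBy_congr {α : Type} (lt lt' : α → α → Bool) :
    ∀ (xs acc : List α),
      (∀ a b, (a ∈ xs ∨ a ∈ acc) → (b ∈ xs ∨ b ∈ acc) → lt a b = lt' a b) →
      xs.foldl (fun acc x => PySem.List.insertBy lt x acc) acc
        = xs.foldl (fun acc x => PySem.List.insertBy lt' x acc) acc := by
  intro xs
  induction xs with
  | nil => intro acc _; rfl
  | cons x xs ih =>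
    intro acc h
    simp only [List.foldl_cons]
    rw [pvInsertBy_congr lt lt' x acc
      (fun y hy => h x y (Or.inl List.mem_cons_self) (Or.inr hy))]
    apply ih
    intro a b hamem hbmem
    apply h a b
    · rcases hamem with ha | ha
      · exact Or.inl (List.mem_cons_of_mem x ha)
      · rcases (PySem.List.mem_insertBy _ x a acc).mp ha with rfl | ha
        · exact Or.inl List.mem_cons_self
        · exact Or.inr ha
    · rcases hbmem with hb | hb
      · exact Or.inl (List.mem_cons_of_mem x hb)
      · rcases (PySem.List.mem_insertBy _ x b acc).mp hb with rfl | hb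
        · exact Or.inl List.mem_cons_self
        · exact Or.inr hb

theorem pvMem_cells (mlen d : Int) (a : Int × Int) :
    a ∈ pvCells mlen d ↔
      0 ≤ a.2 ∧ a.2 ≤ mlen ∧ mlen + 1 - a.2 ≤ a.1 ∧ a.1 < mlen + 1 - a.2 + d := by
  unfold pvCells
  simp only [List.mem_flatMap, List.mem_map, PySem.List.mem_pyRange_one]
  constructor
  · rintro ⟨y, hy, x, hx, rfl⟩
    omega
  · rintro ⟨h1, h2, h3, h4⟩
    exact ⟨a.2, by omega, a.1, by omega, rfl⟩

theorem pvMem_tgt (mlen d : Int) (a : Int × Int) :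
    a ∈ pvTgt mlen d ↔
      0 ≤ a.2 ∧ a.2 ≤ mlen ∧ mlen + 1 - a.2 ≤ a.1 ∧ a.1 < mlen + 1 - a.2 + d := by
  unfold pvTgt pvDiag
  simp only [List.mem_flatMap, PySem.List.mem_pyRange_one]
  constructor
  · rintro ⟨e, he, ha⟩
    split_ifs at ha <;>
    · simp only [List.mem_map, PySem.List.mem_pyRange_one] at ha
      obtain ⟨i, hi, rfl⟩ := ha
      simp only
      omega
  · rintro ⟨h1, h2, h3, h4⟩
    refine ⟨a.1 + a.2 - mlen - 1, by omega, ?_⟩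
    split_ifs with hpar
    · simp only [List.mem_map, PySem.List.mem_pyRange_one]
      exact ⟨a.2, by omega, by obtain ⟨x, y⟩ := a; simp only at *; congr 1 <;> omega⟩
    · simp only [List.mem_map, PySem.List.mem_pyRange_one]
      exact ⟨mlen - a.2, by omega, by obtain ⟨x, y⟩ := a; simp only at *; congr 1 <;> omega⟩

theorem pvTgt_pairwise (mlen d : Int) :
    (pvTgt mlen d).Pairwise (fun a b => pvKey mlen a < pvKey mlen b) := by
  unfold pvTgt
  rw [List.pairwise_flatMap]
  constructor
  · intro e _
    unfold pvDiag
    have hrange : (PySem.List.pyRange 0 (mlen + 1) 1).Pairwise (fun i j : Int => i < j) := by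
      rw [PySem.List.pyRange_one]
      refine List.Pairwise.map _ ?_ (List.pairwise_lt_range)
      intro i j hij
      omega
    split_ifs with hpar
    · refine List.Pairwise.map _ ?_ hrange
      intro i j hij
      have hs : (mlen - i + e + 1) + i = mlen + e + 1 := by ring
      have hs' : (mlen - j + e + 1) + j = mlen + e + 1 := by ring
      unfold pvKey
      simp only [hs, hs']
      have : (mlen + e + 1) % 2 = 0 := by omega
      rw [if_pos this, if_pos this]
      omega
    · refine List.Pairwise.map _ ?_ hrange
      intro i j hij
      have hs : (i + e + 1) + (mlen - i) = mlen + e + 1 := by ring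
      have hs' : (j + e + 1) + (mlen - j) = mlen + e + 1 := by ring
      unfold pvKey
      simp only [hs, hs']
      have : ¬ (mlen + e + 1) % 2 = 0 := by omega
      rw [if_neg this, if_neg this]
      omega
  · have hrange : (PySem.List.pyRange 0 d 1).Pairwise (fun i j : Int => i < j) := by
      rw [PySem.List.pyRange_one]
      refine List.Pairwise.map _ ?_ (List.pairwise_lt_range)
      intro i j hij
      omega
    refine hrange.imp_of_mem ?_
    intro e1 e2 he1 he2 hlt a ha b hb
    have hamem : 0 ≤ a.2 ∧ a.2 ≤ mlen ∧ a.1 + a.2 = mlen + e1 + 1 := by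
      unfold pvDiag at ha
      split_ifs at ha <;>
      · simp only [List.mem_map, PySem.List.mem_pyRange_one] at ha
        obtain ⟨i, hi, rfl⟩ := ha
        constructor
        · simp only; omega
        constructor
        · simp only; omega
        · simp only; ring
    have hbmem : 0 ≤ b.2 ∧ b.2 ≤ mlen ∧ b.1 + b.2 = mlen + e2 + 1 := by
      unfold pvDiag at hb
      split_ifs at hb <;>
      · simp only [List.mem_map, PySem.List.mem_pyRange_one] at hb
        obtain ⟨i, hi, rfl⟩ := hb
        constructor
        · simp only; omega
        constructor
        · simp only; omega
        · simp only; ring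
    exact pvKey_lt_of_sum_lt mlen a b ⟨hamem.1, hamem.2.1⟩ ⟨hbmem.1, hbmem.2.1⟩ (by omega)

theorem pvCells_nodup (mlen d : Int) : (pvCells mlen d).Nodup := by
  unfold pvCells List.Nodup
  rw [List.pairwise_flatMap]
  have hrange : ∀ a b : Int, (PySem.List.pyRange a b 1).Pairwise (fun i j : Int => i < j) := by
    intro a b
    rw [PySem.List.pyRange_one]
    refine List.Pairwise.map _ ?_ (List.pairwise_lt_range)
    intro i j hij
    omega
  constructor
  · intro y _
    refine List.Pairwise.map _ ?_ (hrange _ _)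
    intro x1 x2 h12 he
    exact absurd (congrArg Prod.fst he) (by simpa using ne_of_lt h12)
  · refine (hrange _ _).imp ?_
    intro y1 y2 h12 a ha b hb he
    simp only [List.mem_map] at ha hb
    obtain ⟨x1, _, rfl⟩ := ha
    obtain ⟨x2, _, rfl⟩ := hb
    exact absurd (congrArg Prod.snd he) (by simpa using ne_of_lt h12)

theorem pvTgt_perm_cells (mlen d : Int) : (pvTgt mlen d).Perm (pvCells mlen d) := by
  have hnt : (pvTgt mlen d).Nodup :=
    (pvTgt_pairwise mlen d).imp (fun {a b} h => fun he => by rw [he] at h; exact lt_irrefl _ h)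
  rw [List.perm_ext_iff_of_nodup hnt (pvCells_nodup mlen d)]
  intro a
  rw [pvMem_tgt, pvMem_cells]

theorem pvSorted2_eq_tgt (mlen d : Int) :
    PySem.List.sorted2 (pvCells mlen d) (fun c => c.1 + c.2)
      (fun c => if PySem.Int.mod (c.1 + c.2) 2 = 0 then c.2 else -c.2)
      = pvTgt mlen d := by
  have hstep : PySem.List.sorted2 (pvCells mlen d) (fun c => c.1 + c.2)
      (fun c => if PySem.Int.mod (c.1 + c.2) 2 = 0 then c.2 else -c.2)
      = PySem.List.sorted (pvCells mlen d) (pvKey mlen) := by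
    rw [PySem.List.sorted_eq_foldl_insertBy]
    show (pvCells mlen d).foldl (fun acc x => PySem.List.insertBy _ x acc) []
        = (pvCells mlen d).foldl (fun acc x => PySem.List.insertBy _ x acc) []
    apply pvFoldl_insertBy_congr
    intro a b hamem hbmem
    simp only [Bool.false_eq_true, if_false]
    have ha : 0 ≤ a.2 ∧ a.2 ≤ mlen := by
      rcases hamem with h | h
      · have := (pvMem_cells mlen d a).mp h; exact ⟨this.1, this.2.1⟩
      · simp at h
    have hb : 0 ≤ b.2 ∧ b.2 ≤ mlen := by
      rcases hbmem with h | h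
      · have := (pvMem_cells mlen d b).mp h; exact ⟨this.1, this.2.1⟩
      · simp at h
    have hmoda : PySem.Int.mod (a.1 + a.2) 2 = (a.1 + a.2) % 2 :=
      PySem.Int.mod_eq_emod_of_pos (by omega)
    have hmodb : PySem.Int.mod (b.1 + b.2) 2 = (b.1 + b.2) % 2 :=
      PySem.Int.mod_eq_emod_of_pos (by omega)
    simp only [hmoda, hmodb]
    rw [Bool.eq_iff_iff]
    simp only [Bool.or_eq_true, Bool.and_eq_true, Bool.not_eq_true', decide_eq_true_eq,
      decide_eq_false_iff_not]
    rw [pvKey_lt_iff mlen a b ha hb]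
    constructor
    · rintro (h | ⟨h, hr⟩)
      · exact Or.inl h
      · rcases lt_or_ge (a.1 + a.2) (b.1 + b.2) with hx | hx
        · exact Or.inl hx
        · exact Or.inr ⟨by omega, hr⟩
    · rintro (h | ⟨h, hr⟩)
      · exact Or.inl h
      · exact Or.inr ⟨by omega, hr⟩
  rw [hstep]
  exact PySem.List.sorted_eq_of_perm_of_pairwise_lt _ _ _ (pvTgt_perm_cells mlen d) (pvTgt_pairwise mlen d)

-- A's nested loops produce exactly the matrix read along pvTgt
theorem pvA_eq_tgt_map (matirx : List (List Int)) (mlen mcols mrows : Int) :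
    rowmore_middle_encode matirx mlen mcols mrows
      = (pvTgt mlen (mrows - mcols)).map
          (fun c => PySem.List.pyGetD (PySem.List.pyGetD matirx c.1 []) c.2 0) := by
  unfold rowmore_middle_encode pvTgt
  rw [List.map_flatMap]
  have hmod : ∀ x : Int, PySem.Int.mod x 2 = x % 2 := fun x => PySem.Int.mod_eq_emod_of_pos (by omega)
  by_cases hm : PySem.Int.mod mlen 2 = 0
  · rw [if_pos hm]
    rw [hmod] at hm
    conv_rhs => rw [← List.nil_append (List.flatMap _ _)]
    rw [← PySem.List.foldl_append_eq_flatMap]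
    apply List.foldl_ext
    intro acc extra _
    dsimp only
    unfold pvDiag
    by_cases he : PySem.Int.mod extra 2 = 1
    · rw [if_pos he, PySem.List.foldl_append_singleton_eq_map]
      rw [hmod] at he
      rw [if_pos (by omega : (mlen + extra) % 2 = 1), List.map_map]
      rfl
    · rw [if_neg he, PySem.List.foldl_append_singleton_eq_map]
      rw [hmod] at he
      rw [if_neg (by omega : ¬ (mlen + extra) % 2 = 1), List.map_map]
      rfl
  · rw [if_neg hm]
    rw [hmod] at hm
    conv_rhs => rw [← List.nil_append (List.flatMap _ _)]
    rw [← PySem.List.foldl_append_eq_flatMap]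
    apply List.foldl_ext
    intro acc extra _
    dsimp only
    unfold pvDiag
    by_cases he : PySem.Int.mod extra 2 = 0
    · rw [if_pos he, PySem.List.foldl_append_singleton_eq_map]
      rw [hmod] at he
      rw [if_pos (by omega : (mlen + extra) % 2 = 1), List.map_map]
      rfl
    · rw [if_neg he, PySem.List.foldl_append_singleton_eq_map]
      rw [hmod] at he
      rw [if_neg (by omega : ¬ (mlen + extra) % 2 = 1), List.map_map]
      rfl

-- ===== VERDICT (by name: the statement is the Claim_ definition above) =====
theorem rowmore_middle_encode_spec : Claim_equal_rowmore_middle_encode := by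
  unfold Claim_equal_rowmore_middle_encode
  intro matirx mlen mcols mrows _ _
  unfold Spec_rowmore_middle_encode rowmore_middle_encode_alt
  rw [pvA_eq_tgt_map]
  by_cases hd : mrows ≤ mcols
  · rw [if_pos hd]
    unfold pvTgt
    rw [PySem.List.pyRange_one, (by omega : (mrows - mcols - 0).toNat = 0)]
    rfl
  · rw [if_neg hd]
    show _ = (PySem.List.sorted2 (pvCells mlen (mrows - mcols)) _ _).map _
    rw [pvSorted2_eq_tgt]
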